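-- pv_equiv track=rewrite | github.com/SoominHeo/src | Herald/lcslib.py | common_set_table
-- ===== SOURCE A (Python) =====
-- def common_set_table(list1,list2):
-- 	table = []
--
-- 	for element_1 in range(len(list1)):
-- 		tmp = []
-- 		for element_2 in range(len(list2)):
-- 			#append len(intersection)
-- 			tmp.append(len(list(set(list1[element_1]) & set(list2[element_2]))))
-- 		table.append(tmp)
-- 	# for idx,line in enumerate(list1):
-- 	# for idx,line in enumerate(list2):
-- 	return table
-- ===== SOURCE B (Python) =====
-- def common_set_table(list1, list2):
--     # Inverted index: for each distinct character, the row indices j of list2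
--     # whose string contains it; then scatter counts into each row.
--     pairs = [(c, j) for j, s in enumerate(list2) for c in set(s)]
--     index = {}
--     for c, j in pairs:
--         index.setdefault(c, []).append(j)
--     n2 = len(list2)
--     table = []
--     for s in list1:
--         row = [0] * n2
--         for c in set(s):
--             for j in index.get(c, []):
--                 row[j] += 1
--         table.append(row)
--     return table
-- ===== Notes on version B (the rewrite author's own statement) =====
-- stated objective: faster
-- what changed: Replaces the nested per-pair set-intersection loops (which rebuild set(list2[j]) for every i) by an inverted index of list2 built once (char -> list of row indices), each output row built by scattering +1 increments through that index into a zero row.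
import Mathlib
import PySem

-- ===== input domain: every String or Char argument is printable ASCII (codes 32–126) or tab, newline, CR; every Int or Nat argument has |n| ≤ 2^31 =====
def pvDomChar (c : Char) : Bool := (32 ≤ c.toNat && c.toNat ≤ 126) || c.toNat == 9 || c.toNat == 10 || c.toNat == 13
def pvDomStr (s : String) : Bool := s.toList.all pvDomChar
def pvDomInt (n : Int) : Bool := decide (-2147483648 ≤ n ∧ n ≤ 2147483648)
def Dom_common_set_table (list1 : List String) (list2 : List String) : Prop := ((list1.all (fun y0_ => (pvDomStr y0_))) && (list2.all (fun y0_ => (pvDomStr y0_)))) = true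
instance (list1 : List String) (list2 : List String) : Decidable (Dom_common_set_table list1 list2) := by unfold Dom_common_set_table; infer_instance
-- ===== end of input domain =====

-- B replaces the pairwise set-intersection double loop by an inverted index of list2
-- (char -> row indices, built once) and scatters increments into each row (measured faster in a timing run).

-- ===== PORT A =====
def common_set_table (list1 : List String) (list2 : List String) : List (List Int) :=
  (PySem.List.pyRange 0 (PySem.List.len list1)).foldl (fun table element_1 =>
    table ++ [ (PySem.List.pyRange 0 (PySem.List.len list2)).foldl (fun tmp element_2 =>
      tmp ++ [ PySem.Set.len (PySem.Set.inter
                 (PySem.Set.ofList (PySem.List.pyGetD list1 element_1 "").toList)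
                 (PySem.Set.ofList (PySem.List.pyGetD list2 element_2 "").toList)) ]) [] ]) []

-- ===== PORT B =====
-- pairs = [(c, j) for j, s in enumerate(list2) for c in set(s)]; index[c] built by setdefault/append
def pvIndex (list2 : List String) : PySem.Dict Char (List Int) :=
  ((PySem.List.enumerate list2).flatMap
      (fun p => (PySem.Set.ofList p.2.toList).map (fun c => (c, p.1)))).foldl
    (fun d q => d.modify q.1 [] (fun l => l ++ [q.2])) PySem.Dict.empty

def common_set_table_alt (list1 : List String) (list2 : List String) : List (List Int) :=
  let index := pvIndex list2
  list1.foldl (fun table s =>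
    table ++ [ (PySem.Set.ofList s.toList).foldl (fun row c =>
        (index.getD c []).foldl
          (fun row j => PySem.List.pySetD row j (PySem.List.pyGetD row j 0 + 1)) row)
      (List.replicate list2.length 0) ]) []

-- ===== PRECONDITION & SPEC =====
def Spec_common_set_table (list1 : List String) (list2 : List String) (out : List (List Int)) : Prop := out = common_set_table_alt list1 list2
instance (list1 : List String) (list2 : List String) (out : List (List Int)) : Decidable (Spec_common_set_table list1 list2 out) := by unfold Spec_common_set_table; infer_instance

-- ===== CLAIM (what is proved, stated in full; the proofs are below) =====
def Claim_equal_common_set_table : Prop := ∀ (list1 : List String) (list2 : List String), Dom_common_set_table list1 list2 → Spec_common_set_table list1 list2 (common_set_table list1 list2)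

-- ===== LEMMAS AND PROOFS =====

-- indices produced by enumerate are ≥ the start value
theorem pv_enum_fst_ge {α : Type} (l : List α) (start : Int) :
    ∀ p ∈ PySem.List.enumerate l start, start ≤ p.1 := by
  induction l generalizing start with
  | nil => simp [PySem.List.enumerate]
  | cons x t ih =>
      intro p hp
      simp [PySem.List.enumerate] at hp
      rcases hp with h | h
      · simp [h]
      · have := ih (start + 1) p h; omega

-- filtering a Nodup list for equality with c yields [c] or []
theorem pv_filter_beq_nodup {α : Type} [BEq α] [LawfulBEq α] (l : List α) (c : α)
    (h : l.Nodup) : l.filter (fun x => x == c) = if c ∈ l then [c] else [] := by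
  induction l with
  | nil => simp
  | cons x t ih =>
      rcases List.nodup_cons.mp h with ⟨hx, ht⟩
      by_cases hxc : x = c
      · subst hxc
        have hft : t.filter (fun y => y == x) = [] :=
          List.filter_eq_nil_iff.mpr (fun a ha => by simp; rintro rfl; exact hx ha)
        simp [hft]
      · simp only [List.filter_cons, beq_iff_eq, hxc, if_false, ih ht]
        by_cases hc : c ∈ t <;> simp [hc, Ne.symm hxc]

-- the inverted index at c lists exactly the enumerate-indices whose string contains c
theorem pv_idx_spec (list2 : List String) (c : Char) :
    (pvIndex list2).getD c [] =
      (PySem.List.enumerate list2).flatMap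
        (fun p => if c ∈ p.2.toList then [p.1] else []) := by
  unfold pvIndex
  rw [PySem.Dict.getD_foldl_modify_append]
  simp [List.filter_flatMap, List.map_flatMap]
  congr 1; funext p
  rw [List.filter_map]
  have : ((fun q : Char × Int => q.1 == c) ∘ fun c' => (c', p.1)) = (fun c' => c' == c) := rfl
  rw [this, pv_filter_beq_nodup _ c (PySem.Set.nodup_ofList _)]
  by_cases hc : c ∈ p.2.toList <;>
    simp [hc, PySem.Set.mem_ofList]

-- counting index k in the flattened enumerate-index list
theorem pv_enum_count (l : List String) (c : Char) (start : Int) (k : Nat) (hk : k < l.length) :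
    ((PySem.List.enumerate l start).flatMap
        (fun p => if c ∈ p.2.toList then [p.1] else [])).count (start + k) =
      if c ∈ (l.getD k "").toList then 1 else 0 := by
  induction l generalizing start k with
  | nil => simp at hk
  | cons x t ih =>
      simp only [PySem.List.enumerate, List.flatMap_cons]
      cases k with
      | zero =>
          have hnot : (start : Int) ∉ (PySem.List.enumerate t (start + 1)).flatMap
              (fun p => if c ∈ p.2.toList then [p.1] else []) := by
            intro hmem
            rcases List.mem_flatMap.mp hmem with ⟨p, hp, hin⟩
            have := pv_enum_fst_ge t (start + 1) p hp
            by_cases h : c ∈ p.2.toList <;> simp [h] at hin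
            omega
          simp only [Nat.cast_zero, add_zero, List.count_append,
            List.count_eq_zero.mpr hnot]
          by_cases h : c ∈ x.toList <;> simp [h]
      | succ k' =>
          have hk' : k' < t.length := by simpa using hk
          have hih := ih (start + 1) k' hk'
          have harith : start + (↑(k' + 1) : Int) = (start + 1) + ↑k' := by push_cast; ring
          rw [List.count_append, harith, hih]
          have hne : ¬ (start = start + 1 + (k' : Int)) := by omega
          by_cases h : c ∈ x.toList <;> simp [h, hne, List.getD]

def pvStep (row : List Int) (j : Int) : List Int :=
  PySem.List.pySetD row j (PySem.List.pyGetD row j 0 + 1)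

theorem pv_step_length (row : List Int) (j : Int) : (pvStep row j).length = row.length := by
  simp [pvStep, PySem.List.length_pySetD]

theorem pv_inc_fold_length (js : List Int) (row : List Int) :
    (js.foldl pvStep row).length = row.length := by
  induction js generalizing row with
  | nil => rfl
  | cons j t ih => simp [List.foldl_cons, ih, pv_step_length]

theorem pv_inc_fold_getD (js : List Int) (row : List Int) (k : Nat) (hk : k < row.length)
    (hjs : ∀ j ∈ js, 0 ≤ j) :
    (js.foldl pvStep row).getD k 0 = row.getD k 0 + (js.count (k : Int) : Int) := by
  induction js generalizing row with
  | nil => simp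
  | cons j t ih =>
      have hj : 0 ≤ j := hjs j (by simp)
      obtain ⟨n, rfl⟩ : ∃ n : Nat, j = (n : Int) := ⟨j.toNat, by omega⟩
      have hstep : pvStep row (n : Int) = row.set n (row.getD n 0 + 1) := by
        simp [pvStep, PySem.List.pySetD_natCast, PySem.List.pyGetD_natCast]
      rw [List.foldl_cons, hstep]
      have hlen : (row.set n (row.getD n 0 + 1)).length = row.length := by simp
      rw [ih _ (by omega) (fun j hj => hjs j (by simp [hj]))]
      by_cases hnk : n = k
      · subst hnk
        have : (row.set n (row.getD n 0 + 1)).getD n 0 = row.getD n 0 + 1 := by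
          simp [List.getD, List.getElem?_set_self (by omega : n < row.length)]
        rw [this, List.count_cons]
        simp; ring
      · have : (row.set n (row.getD n 0 + 1)).getD k 0 = row.getD k 0 := by
          simp [List.getD, List.getElem?_set_ne hnk]
        rw [this, List.count_cons]
        have : ¬ ((n : Int) = (k : Int)) := by exact_mod_cast hnk
        simp [this]

theorem pv_scatter_length (cs : List Char) (idx : Char → List Int) (row : List Int) :
    (cs.foldl (fun r c => (idx c).foldl pvStep r) row).length = row.length := by
  induction cs generalizing row with
  | nil => rfl
  | cons c t ih => simp [List.foldl_cons, ih, pv_inc_fold_length]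

theorem pv_scatter_getD (cs : List Char) (idx : Char → List Int) (row : List Int)
    (k : Nat) (hk : k < row.length) (h : ∀ c ∈ cs, ∀ j ∈ idx c, 0 ≤ j) :
    (cs.foldl (fun r c => (idx c).foldl pvStep r) row).getD k 0 =
      row.getD k 0 + ((cs.map (fun c => ((idx c).count (k : Int) : Int))).sum) := by
  induction cs generalizing row with
  | nil => simp
  | cons c t ih =>
      rw [List.foldl_cons,
        ih _ (by rw [pv_inc_fold_length]; exact hk) (fun c hc => h c (by simp [hc])),
        pv_inc_fold_getD _ _ _ hk (h c (by simp))]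
      simp; ring

theorem pv_sum_ite_eq_countP (p : Char → Prop) [DecidablePred p] (l : List Char) :
    (l.map (fun c => ((if p c then 1 else 0 : Nat) : Int))).sum =
      ((l.countP (fun c => decide (p c)) : Nat) : Int) := by
  induction l with
  | nil => simp
  | cons c t ih =>
      simp only [List.map_cons, List.sum_cons, List.countP_cons, ih]
      by_cases h : p c <;> simp [h] <;> ring

-- the row B builds for string s equals A's row of intersection sizes
theorem pv_row_eq (s : String) (list2 : List String) :
    (PySem.Set.ofList s.toList).foldl (fun row c =>
        ((pvIndex list2).getD c []).foldl pvStep row) (List.replicate list2.length 0) =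
      list2.map (fun t => PySem.Set.len (PySem.Set.inter
        (PySem.Set.ofList s.toList) (PySem.Set.ofList t.toList))) := by
  have hnn : ∀ c ∈ PySem.Set.ofList s.toList, ∀ j ∈ (pvIndex list2).getD c [], 0 ≤ j := by
    intro c _ j hj
    rw [pv_idx_spec] at hj
    rcases List.mem_flatMap.mp hj with ⟨p, hp, hin⟩
    have := pv_enum_fst_ge list2 0 p hp
    by_cases h : c ∈ p.2.toList <;> simp [h] at hin
    omega
  apply List.ext_getElem
  · rw [pv_scatter_length]; simp
  · intro k hk1 hk2
    have hk : k < list2.length := by simpa using hk2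
    have hlen : k < (List.replicate list2.length (0:Int)).length := by simpa using hk
    have hgd := pv_scatter_getD (PySem.Set.ofList s.toList)
      (fun c => (pvIndex list2).getD c []) (List.replicate list2.length 0) k hlen hnn
    have hL : ((PySem.Set.ofList s.toList).foldl (fun row c =>
        ((pvIndex list2).getD c []).foldl pvStep row) (List.replicate list2.length 0))[k] =
        ((PySem.Set.ofList s.toList).foldl (fun row c =>
        ((pvIndex list2).getD c []).foldl pvStep row) (List.replicate list2.length 0)).getD k 0 := by
      rw [List.getD_eq_getElem _ _ hk1]
    rw [hL, hgd]
    have hcnt : ∀ c, ((pvIndex list2).getD c []).count ((k : Int)) =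
        if c ∈ (list2.getD k "").toList then 1 else 0 := by
      intro c
      rw [pv_idx_spec]
      have := pv_enum_count list2 c 0 k hk
      simpa using this
    simp only [hcnt]
    rw [pv_sum_ite_eq_countP (fun c => c ∈ (list2.getD k "").toList)]
    rw [List.getD_replicate 0 hk, List.getElem_map]
    show (0 : Int) + _ = ((PySem.Set.ofList s.toList).filter
      (fun x => PySem.Set.contains (PySem.Set.ofList (list2[k]).toList) x) |>.length : Int)
    rw [zero_add, ← List.countP_eq_length_filter]
    congr 1
    apply List.countP_congr
    intro c _
    simp [PySem.Set.contains, PySem.Set.mem_ofList, List.getD, List.getElem?_eq_getElem hk]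

theorem pv_map_pyGetD {α β : Type} [Inhabited α] (xs : List α) (d : α) (g : α → β) :
    List.map (fun e => g (PySem.List.pyGetD xs e d)) (PySem.List.pyRange 0 (PySem.List.len xs)) =
      List.map g xs := by
  have h := congrArg (List.map g) (PySem.List.map_pyGetD_pyRange_zero xs d)
  rwa [List.map_map] at h

-- ===== VERDICT (by name: the statement is the Claim_ definition above) =====
theorem common_set_table_spec : Claim_equal_common_set_table := by
  intro list1 list2 _
  unfold Spec_common_set_table common_set_table common_set_table_alt
  simp only [PySem.List.foldl_append_singleton_eq_map, List.nil_append]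
  rw [show (fun element_1 => List.map (fun element_2 =>
        PySem.Set.len (PySem.Set.inter
          (PySem.Set.ofList (PySem.List.pyGetD list1 element_1 "").toList)
          (PySem.Set.ofList (PySem.List.pyGetD list2 element_2 "").toList)))
        (PySem.List.pyRange 0 (PySem.List.len list2))) =
      (fun element_1 => List.map (fun t => PySem.Set.len (PySem.Set.inter
          (PySem.Set.ofList (PySem.List.pyGetD list1 element_1 "").toList)
          (PySem.Set.ofList t.toList))) list2) from funext (fun e1 => pv_map_pyGetD list2 ""
        (fun t => PySem.Set.len (PySem.Set.inter
          (PySem.Set.ofList (PySem.List.pyGetD list1 e1 "").toList)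
          (PySem.Set.ofList t.toList)))),
    pv_map_pyGetD list1 "" (fun s => List.map (fun t => PySem.Set.len (PySem.Set.inter
      (PySem.Set.ofList s.toList) (PySem.Set.ofList t.toList))) list2)]
  refine (List.map_congr_left ?_).symm
  intro s _
  exact pv_row_eq s list2
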